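-- pv_equiv track=rewrite | github.com/mastergap/hackerrank | bin/Implementation.py | max_known_topics_teams
-- ===== SOURCE A (Python) =====
-- def known_topics_number(person1, person2):
--     """
--     :type person1: str
--     :type person2: str
--     :rtype: int
--     """
--     return sum(1 if x[0] == '1' or x[1] == '1' else 0 for x in zip(person1, person2))
--
-- def max_known_topics_teams(persons):
--     """
--     :type persons: list[str]
--     :rtype: (int, int)
--     """
--     max_known_topics = 0
--     max_known_topics_teams_count = 0
--
--     for i, person1 in enumerate(persons):
--         for person2 in persons[i + 1:]:
--             temp = known_topics_number(person1, person2)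
--             if temp > max_known_topics:
--                 max_known_topics_teams_count = 1
--                 max_known_topics = temp
--             elif temp == max_known_topics:
--                 max_known_topics_teams_count += 1
--
--     return max_known_topics, max_known_topics_teams_count
-- ===== SOURCE B (Python) =====
-- def max_known_topics_teams(persons):
--     """
--     :type persons: list[str]
--     :rtype: (int, int)
--     """
--     # Descending search over candidate scores: the answer is the largest s
--     # (bounded by the longest string) for which some pair's OR-score equals s.
--     limit = 0
--     for p in persons:
--         if len(p) > limit:
--             limit = len(p)
--     s = limit
--     while s >= 0:
--         c = 0
--         for i, p1 in enumerate(persons):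
--             for p2 in persons[i + 1:]:
--                 k = 0
--                 for a, b in zip(p1, p2):
--                     if a == '1' or b == '1':
--                         k += 1
--                 if k == s:
--                     c += 1
--         if c > 0:
--             return s, c
--         s -= 1
--     return 0, 0
-- ===== Notes on version B (the rewrite author's own statement) =====
-- stated objective: alternative
-- what changed: Replaces the single-pass running-max-with-reset-counter loop by a descending search over candidate score values: for s from the longest string's length down to 0, count the pairs whose OR-score equals exactly s and return at the first s with a positive count.
import Mathlib
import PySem

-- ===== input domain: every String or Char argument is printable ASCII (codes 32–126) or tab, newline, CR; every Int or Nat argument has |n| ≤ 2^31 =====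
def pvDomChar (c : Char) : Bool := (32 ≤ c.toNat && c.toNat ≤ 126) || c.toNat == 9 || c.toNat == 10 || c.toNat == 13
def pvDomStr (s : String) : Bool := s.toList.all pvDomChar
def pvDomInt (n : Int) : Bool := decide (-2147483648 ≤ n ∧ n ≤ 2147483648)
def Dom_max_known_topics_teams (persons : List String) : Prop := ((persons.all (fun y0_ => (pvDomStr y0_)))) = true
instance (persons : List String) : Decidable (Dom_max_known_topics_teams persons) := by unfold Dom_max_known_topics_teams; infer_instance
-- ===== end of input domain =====

-- B replaces A's running-max state machine by a descending search over candidate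
-- score values (from the longest string's length down to 0), returning at the
-- first value some pair's OR-score hits (objective: alternative algorithm).

-- ===== PORT A =====
-- sum(1 if x[0]=='1' or x[1]=='1' else 0 for x in zip(person1, person2))
def known_topics_number (person1 person2 : String) : Int :=
  ((person1.toList.zip person2.toList).map
    (fun x => if x.1 = '1' ∨ x.2 = '1' then (1 : Int) else 0)).sum

def max_known_topics_teams (persons : List String) : Int × Int :=
  (PySem.List.enumerate persons 0).foldl
    (fun st ip =>
      (PySem.List.slice persons (some (ip.1 + 1)) none).foldl
        (fun st person2 =>
          let temp := known_topics_number ip.2 person2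
          if temp > st.1 then (temp, 1)
          else if temp = st.1 then (st.1, st.2 + 1)
          else st)
        st)
    (0, 0)

-- ===== PORT B =====
-- inner `k` loop of Source B: count positions where either char is '1'
def bScore (p1 p2 : String) : Int :=
  (p1.toList.zip p2.toList).foldl
    (fun k ab => if ab.1 = '1' ∨ ab.2 = '1' then k + 1 else k) 0

-- the `c` double loop of Source B: how many pairs score exactly s
def bCountAt (persons : List String) (s : Int) : Int :=
  (PySem.List.enumerate persons 0).foldl
    (fun c ip =>
      (PySem.List.slice persons (some (ip.1 + 1)) none).foldl
        (fun c p2 => if bScore ip.2 p2 = s then c + 1 else c) c)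
    0

-- the `while s >= 0` descent of Source B; fuel n+1 means current s = n
def bDescend (persons : List String) : Nat → Int × Int
  | 0 => (0, 0)
  | n + 1 =>
      let c := bCountAt persons (n : Int)
      if c > 0 then ((n : Int), c) else bDescend persons n

def max_known_topics_teams_alt (persons : List String) : Int × Int :=
  let limit : Int :=
    persons.foldl (fun L p => if (p.length : Int) > L then (p.length : Int) else L) 0
  bDescend persons (limit.toNat + 1)

-- ===== PRECONDITION & SPEC =====
def Spec_max_known_topics_teams (persons : List String) (out : Int × Int) : Prop := out = max_known_topics_teams_alt persons
instance (persons : List String) (out : Int × Int) : Decidable (Spec_max_known_topics_teams persons out) := by unfold Spec_max_known_topics_teams; infer_instance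

-- ===== CLAIM (what is proved, stated in full; the proofs are below) =====
def Claim_equal_max_known_topics_teams : Prop := ∀ (persons : List String), Dom_max_known_topics_teams persons → Spec_max_known_topics_teams persons (max_known_topics_teams persons)

-- ===== LEMMAS AND PROOFS =====

-- the multiset of pair scores both programs range over
def pairScores (persons : List String) : List Int :=
  (PySem.List.enumerate persons 0).flatMap
    (fun ip => (PySem.List.slice persons (some (ip.1 + 1)) none).map (bScore ip.2))

-- A's loop-body state transition on one pair-score
def aStep (st : Int × Int) (t : Int) : Int × Int :=
  if t > st.1 then (t, 1) else if t = st.1 then (st.1, st.2 + 1) else st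

-- generic: the i/(i+1:) double loop is a fold of `step` over the flattened score list
lemma foldl_pairs {σ : Type} (persons : List String) (g : String → String → Int)
    (step : σ → Int → σ) (l : List (Int × String)) (st : σ) :
    l.foldl (fun st ip =>
        (PySem.List.slice persons (some (ip.1 + 1)) none).foldl
          (fun st p2 => step st (g ip.2 p2)) st) st
      = (l.flatMap (fun ip =>
          (PySem.List.slice persons (some (ip.1 + 1)) none).map (g ip.2))).foldl step st := by
  induction l generalizing st with
  | nil => rfl
  | cons x xs ih =>
      rw [List.foldl_cons, List.flatMap_cons, List.foldl_append, List.foldl_map, ih]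

-- A's helper equals B's inner counting loop
lemma score_eq : known_topics_number = bScore := by
  funext p1 p2
  unfold known_topics_number bScore
  induction (p1.toList.zip p2.toList) with
  | nil => rfl
  | cons ab l ih =>
      have h : ∀ (l : List (Char × Char)) (k : Int),
          l.foldl (fun k ab => if ab.1 = '1' ∨ ab.2 = '1' then k + 1 else k) k
            = k + l.foldl (fun k ab => if ab.1 = '1' ∨ ab.2 = '1' then k + 1 else k) 0 := by
        intro l
        induction l with
        | nil => intro k; simp
        | cons y ys ihy =>
            intro k
            simp only [List.foldl_cons]
            rw [ihy, ihy (if y.1 = '1' ∨ y.2 = '1' then (0 : Int) + 1 else 0)]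
            split <;> ring
      simp only [List.foldl_cons, List.map_cons, List.sum_cons]
      rw [h, ← ih]
      split <;> ring

-- A's port is the aStep fold over the flattened score list
lemma portA_eq_fold (persons : List String) :
    max_known_topics_teams persons = (pairScores persons).foldl aStep (0, 0) := by
  unfold max_known_topics_teams pairScores
  rw [← score_eq]
  exact foldl_pairs persons known_topics_number aStep _ _

-- B's counter is the count of s in the flattened score list
lemma bCountAt_eq (persons : List String) (s : Int) :
    bCountAt persons s = ((pairScores persons).count s : Int) := by
  unfold bCountAt pairScores
  rw [foldl_pairs persons bScore (fun c t => if t = s then c + 1 else c)]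
  generalize (PySem.List.enumerate persons 0).flatMap _ = ts
  have h : ∀ (l : List Int) (c : Int),
      l.foldl (fun c t => if t = s then c + 1 else c) c = c + (l.count s : Int) := by
    intro l
    induction l with
    | nil => intro c; simp
    | cons t rest ih =>
        intro c
        simp only [List.foldl_cons, List.count_cons]
        rw [ih]
        by_cases ht : t = s
        · simp [ht]; ring
        · have : ¬ (t == s) = true := by simpa using ht
          simp [ht, this]
  rw [h]; simp

-- characterisation of A's fold: running max, and the count of its occurrences (reset on a new max)
lemma fold_aStep_eq (ts : List Int) :
    ∀ (mx c : Int), ts.foldl aStep (mx, c)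
      = (ts.foldl max mx,
          (if ts.foldl max mx = mx then c else 0) + (ts.count (ts.foldl max mx) : Int)) := by
  induction ts with
  | nil => intro mx c; simp
  | cons t rest ih =>
      intro mx c
      have hub := (PySem.List.le_foldl_max rest (max mx t)).1
      simp only [List.foldl_cons]
      by_cases h1 : t > mx
      · have hmx : max mx t = t := by omega
        have ha : aStep (mx, c) t = (t, 1) := by simp [aStep, h1]
        rw [ha, ih t 1]
        simp only [hmx] at hub ⊢
        have hne : rest.foldl max t ≠ mx := by omega
        simp only [Prod.mk.injEq]
        refine ⟨by trivial, ?_⟩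
        by_cases hF : rest.foldl max t = t
        · have hne' : ¬ t = mx := by omega
          simp [hF, hne']
          omega
        · have : ¬ t = rest.foldl max t := fun h => hF h.symm
          simp [hF, hne, this]
      · have hmx : max mx t = mx := by omega
        simp only [hmx] at hub ⊢
        by_cases h2 : t = mx
        · have ha : aStep (mx, c) t = (mx, c + 1) := by simp [aStep, h2]
          rw [ha, ih mx (c + 1)]
          simp only [Prod.mk.injEq]
          refine ⟨by trivial, ?_⟩
          by_cases h3 : rest.foldl max mx = mx
          · simp [h3, h2]; omega
          · have : ¬ t = rest.foldl max mx := by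
              intro h; exact h3 (h ▸ h2.symm ▸ rfl)
            simp [h3, this]
        · have ha : aStep (mx, c) t = (mx, c) := by simp [aStep, h1, h2]
          rw [ha, ih mx c]
          simp only [Prod.mk.injEq]
          refine ⟨by trivial, ?_⟩
          have : ¬ t = rest.foldl max mx := by omega
          simp [this]

-- every pair score is nonnegative and bounded by the left string's length
lemma bScore_bounds (p1 p2 : String) : 0 ≤ bScore p1 p2 ∧ bScore p1 p2 ≤ (p1.toList.length : Int) := by
  unfold bScore
  have h : ∀ (l : List (Char × Char)) (k : Int),
      k ≤ l.foldl (fun k ab => if ab.1 = '1' ∨ ab.2 = '1' then k + 1 else k) k ∧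
      l.foldl (fun k ab => if ab.1 = '1' ∨ ab.2 = '1' then k + 1 else k) k ≤ k + (l.length : Int) := by
    intro l
    induction l with
    | nil => intro k; simp
    | cons y ys ih =>
        intro k
        simp only [List.foldl_cons, List.length_cons]
        constructor
        · refine le_trans ?_ (ih _).1
          split <;> omega
        · refine le_trans (ih _).2 ?_
          split <;> omega
  have hlen : ((p1.toList.zip p2.toList).length : Int) ≤ (p1.toList.length : Int) := by
    have := List.length_zip (l₁ := p1.toList) (l₂ := p2.toList)
    omega
  have := h (p1.toList.zip p2.toList) 0
  exact ⟨this.1, by omega⟩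

-- Source B's `limit` bounds every string length and is nonnegative
lemma limit_bounds (persons : List String) :
    (0 : Int) ≤ persons.foldl (fun L p => if (p.length : Int) > L then (p.length : Int) else L) 0 ∧
    ∀ p ∈ persons, (p.length : Int) ≤
      persons.foldl (fun L p => if (p.length : Int) > L then (p.length : Int) else L) 0 := by
  have h : ∀ (l : List String) (L0 : Int),
      L0 ≤ l.foldl (fun L p => if (p.length : Int) > L then (p.length : Int) else L) L0 ∧
      ∀ p ∈ l, (p.length : Int) ≤ l.foldl (fun L p => if (p.length : Int) > L then (p.length : Int) else L) L0 := by
    intro l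
    induction l with
    | nil => intro L0; simp
    | cons q qs ih =>
        intro L0
        simp only [List.foldl_cons]
        constructor
        · refine le_trans ?_ (ih _).1
          split <;> omega
        · intro p hp
          rcases List.mem_cons.mp hp with rfl | hp
          · refine le_trans ?_ (ih _).1
            split <;> omega
          · exact (ih _).2 p hp
  exact h persons 0

-- pair scores lie in [0, limit]
lemma pairScores_bounds (persons : List String) :
    ∀ t ∈ pairScores persons, 0 ≤ t ∧
      t ≤ persons.foldl (fun L p => if (p.length : Int) > L then (p.length : Int) else L) 0 := by
  intro t ht
  unfold pairScores at ht
  simp only [List.mem_flatMap, List.mem_map] at ht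
  obtain ⟨ip, hip, p2, _, rfl⟩ := ht
  have hmem : ip.2 ∈ persons := by
    have := PySem.List.map_snd_enumerate (xs := persons) (s := 0)
    rw [← this]
    exact List.mem_map.mpr ⟨ip, hip, rfl⟩
  have hb := bScore_bounds ip.2 p2
  have hl := (limit_bounds persons).2 ip.2 hmem
  have : (ip.2.length : Int) = (ip.2.toList.length : Int) := by
    rw [String.length_toList]
  refine ⟨hb.1, ?_⟩
  omega

-- if any pair exists, the running max is attained
lemma max_mem (ts : List Int) (hne : ts ≠ []) (hnn : ∀ t ∈ ts, 0 ≤ t) :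
    ts.foldl max 0 ∈ ts := by
  rcases PySem.List.foldl_max_mem ts 0 with h | h
  · cases ts with
    | nil => exact absurd rfl hne
    | cons a l =>
        have ha := hnn a (List.mem_cons_self ..)
        have hle := (PySem.List.le_foldl_max (a :: l) 0).2 a (List.mem_cons_self ..)
        have : a = 0 := by omega
        rw [h, ← this]
        exact List.mem_cons_self ..
  · exact h

-- the descent never fires when there are no pairs
lemma descend_empty (persons : List String) (hempty : pairScores persons = []) :
    ∀ n, bDescend persons n = (0, 0) := by
  intro n
  induction n with
  | zero => rfl
  | succ m ih =>
      show (let c := bCountAt persons (m : Int);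
            if c > 0 then ((m : Int), c) else bDescend persons m) = (0, 0)
      rw [bCountAt_eq, hempty]
      simpa using ih

-- the descent finds the maximum score and its multiplicity
lemma descend_finds (persons : List String) (hne : pairScores persons ≠ []) :
    ∀ n : Nat, (pairScores persons).foldl max 0 ≤ (n : Int) →
      bDescend persons (n + 1)
        = ((pairScores persons).foldl max 0,
           ((pairScores persons).count ((pairScores persons).foldl max 0) : Int)) := by
  have hnn : ∀ t ∈ pairScores persons, 0 ≤ t := fun t ht => (pairScores_bounds persons t ht).1
  have hmem := max_mem (pairScores persons) hne hnn
  have hpos : 0 < ((pairScores persons).count ((pairScores persons).foldl max 0) : Int) := by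
    have := List.count_pos_iff.mpr hmem
    omega
  have hub := (PySem.List.le_foldl_max (pairScores persons) 0).2
  have h0 : 0 ≤ (pairScores persons).foldl max 0 := (PySem.List.le_foldl_max (pairScores persons) 0).1
  intro n
  induction n with
  | zero =>
      intro hle
      have hM : (pairScores persons).foldl max 0 = 0 := by omega
      show (let c := bCountAt persons ((0:Nat) : Int);
            if c > 0 then (((0:Nat) : Int), c) else bDescend persons 0) = _
      rw [bCountAt_eq]
      rw [show ((0:Nat):Int) = (pairScores persons).foldl max 0 by omega]
      rw [if_pos hpos]
  | succ m ih =>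
      intro hle
      show (let c := bCountAt persons ((m + 1 : Nat) : Int);
            if c > 0 then (((m + 1 : Nat) : Int), c) else bDescend persons (m + 1)) = _
      rw [bCountAt_eq]
      by_cases hM : (pairScores persons).foldl max 0 = ((m + 1 : Nat) : Int)
      · rw [← hM]
        rw [if_pos hpos]
      · have hcz : (pairScores persons).count ((m + 1 : Nat) : Int) = 0 := by
          rw [List.count_eq_zero]
          intro hc
          have := hub _ hc
          omega
        rw [hcz]
        simp only [CharP.cast_eq_zero, gt_iff_lt, lt_self_iff_false, if_false]
        have : (pairScores persons).foldl max 0 ≤ (m : Int) := by push_cast at hle ⊢; omega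
        simpa using ih this

-- ===== VERDICT (by name: the statement is the Claim_ definition above) =====
theorem max_known_topics_teams_spec : Claim_equal_max_known_topics_teams := by
  intro persons _
  unfold Spec_max_known_topics_teams max_known_topics_teams_alt
  rw [portA_eq_fold, fold_aStep_eq]
  have hA : ((if (pairScores persons).foldl max 0 = 0 then (0:Int) else 0) : Int) = 0 := by
    split <;> rfl
  rw [hA]
  set limit : Int :=
    persons.foldl (fun L p => if (p.length : Int) > L then (p.length : Int) else L) 0 with hlim
  by_cases hempty : pairScores persons = []
  · rw [descend_empty persons hempty]
    rw [hempty]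
    simp
  · have hl0 := (limit_bounds persons).1
    have hMle : (pairScores persons).foldl max 0 ≤ limit := by
      have h : ∀ (l : List Int) (a : Int), a ≤ limit → (∀ t ∈ l, t ≤ limit) →
          l.foldl max a ≤ limit := by
        intro l
        induction l with
        | nil => intro a ha _; simpa using ha
        | cons t rest ih =>
            intro a ha hb
            simp only [List.foldl_cons]
            refine ih _ ?_ (fun x hx => hb x (List.mem_cons_of_mem _ hx))
            have := hb t (List.mem_cons_self ..)
            omega
      exact h _ 0 (by omega)
        (fun t ht => (pairScores_bounds persons t ht).2)
    have hfuel : (pairScores persons).foldl max 0 ≤ ((limit.toNat : Nat) : Int) := by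
      omega
    rw [descend_finds persons hempty limit.toNat hfuel]
    simp
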